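-- pv_equiv track=rewrite | github.com/jefflomacy/villagerdb | translations.py | transform_case
-- ===== SOURCE A (Python) =====
-- def transform_case(name):
--     new_name = []
--     upper_whitelist = [
--         'HHA', 'TV', 'MVP', 'DAL', 'DIY', 'DJ', 'KK', 'OK', 'LCD', 'ACNH',
--         'HMD', 'PJ'
--     ]
--     for word in name.split(" "):
--         if word.upper() in upper_whitelist:
--             # Words that are always upper case.
--             new_name.append(word.upper())
--         elif (not word.isupper()):
--             # If neither in the whitelist or already uppercase, transform to title case.
--             new_name.append(word.title())
--         else:
--             # Otherwhise do not modify this word.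
--             new_name.append(word)
--     name = " ".join(new_name)
--
--     # Remove title case after ' character.
--     commas = [pos for pos, char in enumerate(name) if char == "'"]
--     for comma in commas:
--         if len(name) - 1 > comma:
--             segment1 = name[:comma + 1]
--             segment2 = name[comma + 1].lower()
--             segment3 = name[comma + 2:]
--             name = segment1 + segment2 + segment3
--
--     return name
-- ===== SOURCE B (Python) =====
-- def transform_case(name):
--     upper_whitelist = {
--         'HHA', 'TV', 'MVP', 'DAL', 'DIY', 'DJ', 'KK', 'OK', 'LCD', 'ACNH',
--         'HMD', 'PJ'
--     }
--
--     def fix(word):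
--         u = word.upper()
--         if u in upper_whitelist:
--             word = u
--         elif not word.isupper():
--             word = word.title()
--         # lowercase any character that immediately follows an apostrophe
--         out = []
--         prev_apos = False
--         for ch in word:
--             out.append(ch.lower() if prev_apos else ch)
--             prev_apos = ch == "'"
--         return ''.join(out)
--
--     return ' '.join(fix(w) for w in name.split(' '))
-- ===== Notes on version B (the rewrite author's own statement) =====
-- stated objective: simpler
-- what changed: Single per-word pass: the same case rule plus a forward scan that lowercases each character right after an apostrophe, replacing A's join-then-enumerate-positions-then-repeated-whole-string-reslicing loop.
import Mathlib
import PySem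

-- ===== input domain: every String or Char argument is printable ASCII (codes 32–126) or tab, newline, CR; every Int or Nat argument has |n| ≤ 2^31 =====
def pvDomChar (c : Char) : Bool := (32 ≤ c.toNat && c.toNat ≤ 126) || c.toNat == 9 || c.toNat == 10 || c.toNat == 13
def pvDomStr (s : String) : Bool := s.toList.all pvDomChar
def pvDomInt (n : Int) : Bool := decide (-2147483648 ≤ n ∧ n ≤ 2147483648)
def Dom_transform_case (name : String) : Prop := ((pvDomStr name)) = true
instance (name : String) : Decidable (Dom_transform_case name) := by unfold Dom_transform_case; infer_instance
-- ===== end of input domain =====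

-- B replaces A's join-then-index-collect-and-reslice apostrophe loop by a single per-word pass
-- (case rule + one forward scan lowering the character after each apostrophe); objective: simpler.


-- ===== PORT A =====
-- the upper_whitelist literal (appears verbatim in both Python sources)
def tcUpperWhitelist : List (List Char) :=
  ["HHA".toList, "TV".toList, "MVP".toList, "DAL".toList, "DIY".toList, "DJ".toList,
   "KK".toList, "OK".toList, "LCD".toList, "ACNH".toList, "HMD".toList, "PJ".toList]

-- str.isupper, hand-ported (exact on the ASCII domain, where the cased characters are exactly the letters)
def pyStrIsupper (cs : List Char) : Bool :=
  cs.any PySem.Chars.isalpha && !(cs.any PySem.Chars.islower)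

-- str.title, hand-ported (exact on ASCII; `prev` = previous character was cased)
def pyTitle : List Char → Bool → List Char
  | [], _ => []
  | c :: cs, prev =>
      (if PySem.Chars.isalpha c then
         (if prev then PySem.Chars.lowerChar c else PySem.Chars.upperChar c)
       else c) :: pyTitle cs (PySem.Chars.isalpha c)

-- A, phase 1: the word loop appending into new_name
def tcPhase1 (ws : List (List Char)) : List (List Char) :=
  ws.foldl
    (fun acc word =>
      if PySem.Chars.upper word ∈ tcUpperWhitelist then acc ++ [PySem.Chars.upper word]
      else if !(pyStrIsupper word) then acc ++ [pyTitle word false]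
      else acc ++ [word]) []

-- A, phase 2 loop body: one iteration over a comma position (slice-rebuild of the whole string)
def tcStep (nm : List Char) (comma : Int) : List Char :=
  if (nm.length : Int) - 1 > comma then
    match PySem.List.pyGet? nm (comma + 1) with
    | some c =>
        PySem.List.slice nm none (some (comma + 1)) ++ [PySem.Chars.lowerChar c]
          ++ PySem.List.slice nm (some (comma + 2)) none
    | none => nm   -- unreachable: the guard puts comma+1 in range
  else nm

-- A, phase 2: enumerate to collect apostrophe positions, then the rebuild loop
def tcPhase2 (nm : List Char) : List Char :=
  (((PySem.List.enumerate nm 0).filter (fun p => p.2 == '\'')).map Prod.fst).foldl tcStep nm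

def transform_case (name : String) : String :=
  String.ofList (tcPhase2 (PySem.Chars.join [' '] (tcPhase1 (PySem.Chars.splitOn name.toList [' ']))))

-- ===== PORT B =====
-- the whitelist as a set, as Source B builds it
def tcAltWhitelist : PySem.Set (List Char) := PySem.Set.ofList tcUpperWhitelist

-- Source B's inner forward scan: lowercase each character right after an apostrophe
def tcScan : List Char → Bool → List Char
  | [], _ => []
  | c :: cs, prev => (if prev then PySem.Chars.lowerChar c else c) :: tcScan cs (c == '\'')

-- Source B's fix(word): case rule, then the scan
def tcFixWord (w : List Char) : List Char :=
  let w' := if PySem.Chars.upper w ∈ tcAltWhitelist then PySem.Chars.upper w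
            else if !(pyStrIsupper w) then pyTitle w false
            else w
  tcScan w' false

def transform_case_alt (name : String) : String :=
  String.ofList (PySem.Chars.join [' '] ((PySem.Chars.splitOn name.toList [' ']).map tcFixWord))

-- ===== PRECONDITION & SPEC =====
def Spec_transform_case (name : String) (out : String) : Prop := out = transform_case_alt name
instance (name : String) (out : String) : Decidable (Spec_transform_case name out) := by unfold Spec_transform_case; infer_instance

-- ===== CLAIM =====
def Claim_equal_transform_case : Prop := ∀ (name : String), Dom_transform_case name → Spec_transform_case name (transform_case name)

-- ===== LEMMAS AND PROOFS =====

-- A's word function, extracted for the proof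
def tcWordA (w : List Char) : List Char :=
  if PySem.Chars.upper w ∈ tcUpperWhitelist then PySem.Chars.upper w
  else if !(pyStrIsupper w) then pyTitle w false
  else w

theorem tcPhase1_eq_map (ws : List (List Char)) : tcPhase1 ws = ws.map tcWordA := by
  have hbody : (fun (acc : List (List Char)) word =>
      if PySem.Chars.upper word ∈ tcUpperWhitelist then acc ++ [PySem.Chars.upper word]
      else if !(pyStrIsupper word) then acc ++ [pyTitle word false]
      else acc ++ [word]) = (fun acc word => acc ++ [tcWordA word]) := by
    funext acc w
    simp only [tcWordA]
    split_ifs <;> rfl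
  rw [tcPhase1, hbody, PySem.List.foldl_append_singleton_eq_map]
  simp

theorem tcFixWord_eq (w : List Char) : tcFixWord w = tcScan (tcWordA w) false := by
  simp only [tcFixWord, tcWordA, tcAltWhitelist, PySem.Set.mem_ofList]

theorem getElem?_tcScan (cs : List Char) (p : Bool) (i : Nat) :
    (tcScan cs p)[i]? =
      (cs[i]?).map (fun c =>
        if (if i = 0 then p else cs[i-1]? == some '\'') = true
        then PySem.Chars.lowerChar c else c) := by
  induction cs generalizing p i with
  | nil => simp [tcScan]
  | cons c cs ih =>
    cases i with
    | zero => simp [tcScan]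
    | succ j =>
      cases j with
      | zero => simpa [tcScan] using ih (c == '\'') 0
      | succ k => simpa [tcScan] using ih (c == '\'') (k + 1)

theorem tcStep_set (nm : List Char) (k : Nat) (h : k + 1 < nm.length) :
    tcStep nm (k : Int) = nm.set (k + 1) (PySem.Chars.lowerChar (nm[k + 1])) := by
  have hguard : (nm.length : Int) - 1 > (k : Int) := by omega
  have hcast : (k : Int) + 1 = ((k + 1 : Nat) : Int) := by push_cast; ring
  have hget : PySem.List.pyGet? nm ((k : Int) + 1) = some nm[k + 1] := by
    rw [hcast, PySem.List.pyGet?_natCast, List.getElem?_eq_getElem h]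
  have h2 : (k : Int) + 2 = ((k + 2 : Nat) : Int) := by push_cast; ring
  rw [tcStep, if_pos hguard, hget]
  rw [hcast, h2, PySem.List.slice_to nm (by positivity), PySem.List.slice_from nm (by positivity)]
  rw [List.set_eq_take_cons_drop _ (by omega)]
  simp
  omega

theorem tcStep_id (nm : List Char) (k : Nat) (h : ¬ (k + 1 < nm.length)) :
    tcStep nm (k : Int) = nm := by
  have hguard : ¬ ((nm.length : Int) - 1 > (k : Int)) := by omega
  rw [tcStep, if_neg hguard]

theorem foldl_tcStep_getElem? (commas : List Int) (nm : List Char)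
    (hp : commas.Pairwise (· < ·)) (hnn : ∀ c ∈ commas, 0 ≤ c) (i : Nat) :
    (commas.foldl tcStep nm)[i]? =
      if (∃ c ∈ commas, (i : Int) = c + 1 ∧ c + 1 < (nm.length : Int))
      then (nm[i]?).map PySem.Chars.lowerChar else nm[i]? := by
  induction commas generalizing nm with
  | nil => simp
  | cons c rest ih =>
    have h0 : 0 ≤ c := hnn c (by simp)
    have hlt : ∀ c' ∈ rest, c < c' := fun c' hc' => (List.pairwise_cons.mp hp).1 c' hc'
    obtain ⟨k, rfl⟩ : ∃ k : Nat, c = (k : Int) := ⟨c.toNat, by omega⟩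
    by_cases hb : k + 1 < nm.length
    · rw [List.foldl_cons, tcStep_set nm k hb,
        ih _ (List.pairwise_cons.mp hp).2 (fun c' hc' => hnn c' (by simp [hc']))]
      simp only [List.length_set]
      by_cases h1 : ∃ c' ∈ rest, (i : Int) = c' + 1 ∧ c' + 1 < (nm.length : Int)
      · obtain ⟨c', hc', hi, hlen⟩ := h1
        have hik : ¬ (k + 1 = i) := by have := hlt c' hc'; omega
        rw [if_pos ⟨c', hc', hi, hlen⟩, List.getElem?_set, if_neg hik,
          if_pos ⟨c', List.mem_cons_of_mem _ hc', hi, hlen⟩]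
      · rw [if_neg h1]
        by_cases h2 : (i : Int) = (k : Int) + 1
        · have hik : i = k + 1 := by omega
          rw [if_pos ⟨(k : Int), List.mem_cons_self, h2, by omega⟩]
          subst hik
          rw [List.getElem?_set, if_pos rfl, if_pos hb, List.getElem?_eq_getElem hb]
          rfl
        · have hik : ¬ (k + 1 = i) := by omega
          rw [List.getElem?_set, if_neg hik, if_neg ?_]
          rintro ⟨c', hc', hi, hlen⟩
          rcases List.mem_cons.mp hc' with rfl | hmem
          · exact h2 hi
          · exact h1 ⟨c', hmem, hi, hlen⟩
    · rw [List.foldl_cons, tcStep_id nm k hb,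
        ih _ (List.pairwise_cons.mp hp).2 (fun c' hc' => hnn c' (by simp [hc']))]
      by_cases h1 : ∃ c' ∈ rest, (i : Int) = c' + 1 ∧ c' + 1 < (nm.length : Int)
      · obtain ⟨c', hc', hi, hlen⟩ := h1
        rw [if_pos ⟨c', hc', hi, hlen⟩, if_pos ⟨c', List.mem_cons_of_mem _ hc', hi, hlen⟩]
      · rw [if_neg h1, if_neg ?_]
        rintro ⟨c', hc', hi, hlen⟩
        rcases List.mem_cons.mp hc' with rfl | hmem
        · omega
        · exact h1 ⟨c', hmem, hi, hlen⟩

theorem mem_commas (ds : List Char) (x : Int) :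
    x ∈ ((PySem.List.enumerate ds 0).filter (fun p => p.2 == '\'')).map Prod.fst ↔
      ∃ k : Nat, ∃ h : k < ds.length, x = (k : Int) ∧ ds[k] = '\'' := by
  simp only [List.mem_map, List.mem_filter, PySem.List.mem_enumerate_iff]
  constructor
  · rintro ⟨⟨a, b⟩, ⟨⟨k, hk, hp⟩, hb⟩, rfl⟩
    cases hp
    exact ⟨k, hk, by simp, by simpa using hb⟩
  · rintro ⟨k, hk, rfl, hc⟩
    exact ⟨((k : Int), ds[k]), ⟨⟨k, hk, by simp⟩, by simpa using hc⟩, rfl⟩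

theorem tcPhase2_eq_tcScan (ds : List Char) : tcPhase2 ds = tcScan ds false := by
  have hpair : (((PySem.List.enumerate ds 0).filter (fun p => p.2 == '\'')).map Prod.fst).Pairwise (· < ·) := by
    exact List.Pairwise.map _ (fun a b h => h) ((PySem.List.pairwise_lt_enumerate ds 0).filter _)
  have hnn : ∀ c ∈ ((PySem.List.enumerate ds 0).filter (fun p => p.2 == '\'')).map Prod.fst, 0 ≤ c := by
    intro c hc
    obtain ⟨k, hk, rfl, -⟩ := (mem_commas ds c).mp hc
    positivity
  apply List.ext_getElem?
  intro i
  rw [tcPhase2, foldl_tcStep_getElem? _ ds hpair hnn i, getElem?_tcScan]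
  by_cases hi : i < ds.length
  · rw [List.getElem?_eq_getElem hi]
    by_cases hap : ∃ c ∈ ((PySem.List.enumerate ds 0).filter (fun p => p.2 == '\'')).map Prod.fst,
        (i : Int) = c + 1 ∧ c + 1 < (ds.length : Int)
    · rw [if_pos hap]
      obtain ⟨c, hc, hic, -⟩ := hap
      obtain ⟨k, hk, rfl, hka⟩ := (mem_commas ds c).mp hc
      have hik : i = k + 1 := by omega
      subst hik
      simp [List.getElem?_eq_getElem hk, hka]
    · rw [if_neg hap]
      cases i with
      | zero => simp
      | succ j =>
        have hj : j < ds.length := by omega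
        have hne : ¬ (ds[j] = '\'') := by
          intro hja
          exact hap ⟨(j : Int), (mem_commas ds _).mpr ⟨j, hj, rfl, hja⟩, by push_cast; ring, by omega⟩
        simp [List.getElem?_eq_getElem hj, hne]
  · rw [List.getElem?_eq_none_iff.mpr (by omega)]
    rw [if_neg ?_]
    · simp
    · rintro ⟨c, hc, hic, hlen⟩
      obtain ⟨k, hk, rfl, -⟩ := (mem_commas ds c).mp hc
      omega

-- the flag tcScan carries after consuming xs
def tcFlagEnd (xs : List Char) (p : Bool) : Bool := xs.foldl (fun _ c => c == '\'') p

theorem tcScan_append (xs ys : List Char) (p : Bool) :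
    tcScan (xs ++ ys) p = tcScan xs p ++ tcScan ys (tcFlagEnd xs p) := by
  induction xs generalizing p with
  | nil => rfl
  | cons c cs ih => simp [tcScan, tcFlagEnd, ih (c == '\'')]

theorem tcScan_join (ls : List (List Char)) :
    tcScan (PySem.Chars.join [' '] ls) false =
      PySem.Chars.join [' '] (ls.map (fun w => tcScan w false)) := by
  induction ls with
  | nil => simp [PySem.Chars.join_nil, tcScan]
  | cons x ls ih =>
    cases ls with
    | nil => simp [PySem.Chars.join_singleton]
    | cons y ls' =>
      rw [PySem.Chars.join_cons_cons, List.append_assoc]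
      rw [show ([' '] ++ PySem.Chars.join [' '] (y :: ls')) = ' ' :: PySem.Chars.join [' '] (y :: ls') from rfl]
      rw [tcScan_append, tcScan]
      have hsp : (if tcFlagEnd x false = true then PySem.Chars.lowerChar ' ' else ' ') = ' ' := by
        cases tcFlagEnd x false <;> decide
      rw [hsp, show (' ' == '\'') = false from rfl, ih]
      simp only [List.map_cons]
      rw [PySem.Chars.join_cons_cons, List.append_assoc]
      rfl

theorem transform_case_eq (name : String) : transform_case name = transform_case_alt name := by
  rw [transform_case, transform_case_alt]
  congr 1
  rw [tcPhase1_eq_map, tcPhase2_eq_tcScan, tcScan_join, List.map_map]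
  simp only [Function.comp_def]
  exact congrArg (PySem.Chars.join [' ']) (List.map_congr_left (fun w _ => (tcFixWord_eq w).symm))

-- ===== VERDICT =====
theorem transform_case_spec : Claim_equal_transform_case := by
  intro name _
  unfold Spec_transform_case
  exact transform_case_eq name
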